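-- pv_equiv track=rewrite | github.com/jhu-4466/Gomoku | src/baselineoppo.py | check_win_at
-- ===== SOURCE A (Python) =====
-- GRID_SIZE = 19
--
-- def check_win_at(board, r, c, player):
--     if not (0 <= r < GRID_SIZE and 0 <= c < GRID_SIZE and board[r][c] == 0):
--         return False
--
--     board[r][c] = player  # temp position for checking
--     directions = [(1, 0), (0, 1), (1, 1), (1, -1)]
--     for dr, dc in directions:
--         count = 1
--         for i in range(1, 5):
--             nr, nc = r + i * dr, c + i * dc
--             if 0 <= nr < GRID_SIZE and 0 <= nc < GRID_SIZE and board[nr][nc] == player: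
--                 count += 1
--             else:
--                 break
--         for i in range(1, 5):
--             nr, nc = r - i * dr, c - i * dc
--             if 0 <= nr < GRID_SIZE and 0 <= nc < GRID_SIZE and board[nr][nc] == player:
--                 count += 1
--             else:
--                 break
--
--         if count >= 5:
--             board[r][c] = 0
--             return True
--
--     board[r][c] = 0
--     return False
-- ===== SOURCE B (Python) =====
-- GRID_SIZE = 19
--
-- def check_win_at(board, r, c, player):
--     if not (0 <= r < GRID_SIZE and 0 <= c < GRID_SIZE and board[r][c] == 0):
--         return False
--     for dr, dc in ((1, 0), (0, 1), (1, 1), (1, -1)):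
--         run = best = 0
--         for i in range(-4, 5):
--             nr, nc = r + i * dr, c + i * dc
--             ok = i == 0 or (0 <= nr < GRID_SIZE and 0 <= nc < GRID_SIZE
--                             and board[nr][nc] == player)
--             run = run + 1 if ok else 0
--             if run > best:
--                 best = run
--         if best >= 5:
--             return True
--     return False
-- ===== Notes on version B (the rewrite author's own statement) =====
-- stated objective: simpler
-- what changed: Instead of temporarily writing the stone into the board and counting outward in two break-loops per direction, B scans one contiguous 9-cell window of offsets -4..+4 per direction (the center counted as a match, the board never mutated) and checks whether the longest run of matches reaches 5.
-- outside the precondition, e.g. on check_win_at([[0, 1], [1, 1]], 0, 0, 2): A returns False, B raises IndexError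
import Mathlib
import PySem

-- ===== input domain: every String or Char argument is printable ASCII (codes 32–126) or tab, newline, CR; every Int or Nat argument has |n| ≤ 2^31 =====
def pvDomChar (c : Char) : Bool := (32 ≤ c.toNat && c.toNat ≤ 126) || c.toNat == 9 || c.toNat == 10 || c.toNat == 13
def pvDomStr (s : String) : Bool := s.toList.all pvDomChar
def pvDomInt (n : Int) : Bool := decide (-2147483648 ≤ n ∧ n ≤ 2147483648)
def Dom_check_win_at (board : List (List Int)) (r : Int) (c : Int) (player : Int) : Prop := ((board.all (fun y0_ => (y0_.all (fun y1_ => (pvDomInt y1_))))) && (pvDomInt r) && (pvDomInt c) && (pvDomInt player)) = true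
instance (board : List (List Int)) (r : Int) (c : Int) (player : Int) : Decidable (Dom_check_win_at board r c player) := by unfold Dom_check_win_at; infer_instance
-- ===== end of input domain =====

-- B replaces A's temporary board write and per-direction pair of outward break-loops by a
-- mutation-free scan of the 9-cell window at offsets -4..+4 per direction, taking the longest
-- run of matches (objective: simpler). A's temporary write is restored before every return, so
-- neither version observably mutates the board.

-- ===== PORT A =====

-- board[nr][nc] as an Option (none = IndexError, excluded by Pre_)
def pvCell (board : List (List Int)) (nr nc : Int) : Option Int :=
  (PySem.List.pyGet? board nr).bind (fun row => PySem.List.pyGet? row nc)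

-- '0 <= nr < GRID_SIZE and 0 <= nc < GRID_SIZE and board[nr][nc] == player'
def pvHitA (board : List (List Int)) (player nr nc : Int) : Bool :=
  decide (0 ≤ nr ∧ nr < 19 ∧ 0 ≤ nc ∧ nc < 19) && (pvCell board nr nc == some player)

-- 'for i in range(1, 5): … else: break' (forward arm, offsets +i)
def pvFwdA (board : List (List Int)) (player r c dr dc : Int) : List Int → Int → Int
  | [], count => count
  | i :: rest, count =>
    if pvHitA board player (r + i * dr) (c + i * dc)
    then pvFwdA board player r c dr dc rest (count + 1) else count

-- the second loop (backward arm, offsets -i)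
def pvBwdA (board : List (List Int)) (player r c dr dc : Int) : List Int → Int → Int
  | [], count => count
  | i :: rest, count =>
    if pvHitA board player (r - i * dr) (c - i * dc)
    then pvBwdA board player r c dr dc rest (count + 1) else count

-- 'for dr, dc in directions: … if count >= 5: return True'
def pvDirsA (board : List (List Int)) (player r c : Int) : List (Int × Int) → Bool
  | [] => false
  | (dr, dc) :: rest =>
    let count := pvBwdA board player r c dr dc (PySem.List.pyRange 1 5 1)
                   (pvFwdA board player r c dr dc (PySem.List.pyRange 1 5 1) 1)
    if 5 ≤ count then true else pvDirsA board player r c rest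

-- 'board[r][c] = player' (guard guarantees 0 ≤ r, c; out-of-range set is where Python raises, outside Pre_)
def pvSetCell (board : List (List Int)) (r c v : Int) : List (List Int) :=
  board.set r.toNat ((board.getD r.toNat []).set c.toNat v)

def check_win_at (board : List (List Int)) (r : Int) (c : Int) (player : Int) : Bool :=
  if decide (0 ≤ r ∧ r < 19 ∧ 0 ≤ c ∧ c < 19) && (pvCell board r c == some (0 : Int)) then
    -- temp position for checking; A restores it before every return, so the net board is unchanged
    pvDirsA (pvSetCell board r c player) player r c [(1, 0), (0, 1), (1, 1), (1, -1)]
  else false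

-- ===== PORT B =====

-- longest run of consecutive 'true's, via a (run, best) fold
def pvBestRun (line : List Bool) : Int :=
  (line.foldl (fun (p : Int × Int) b =>
      let run := if b then p.1 + 1 else 0
      (run, if p.2 < run then run else p.2)) (0, 0)).2

-- the 9-cell window at offsets -4..+4 in direction (dr, dc), mapped to 'matches player'
def pvLineB (board : List (List Int)) (player r c dr dc : Int) : List Bool :=
  (PySem.List.pyRange (-4) 5 1).map (fun i =>
    (i == (0 : Int)) ||
      (decide (0 ≤ r + i * dr ∧ r + i * dr < 19 ∧ 0 ≤ c + i * dc ∧ c + i * dc < 19) &&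
        (pvCell board (r + i * dr) (c + i * dc) == some player)))

def check_win_at_alt (board : List (List Int)) (r : Int) (c : Int) (player : Int) : Bool :=
  if decide (0 ≤ r ∧ r < 19 ∧ 0 ≤ c ∧ c < 19) && (pvCell board r c == some (0 : Int)) then
    [((1 : Int), (0 : Int)), (0, 1), (1, 1), (1, -1)].any
      (fun d => decide (5 ≤ pvBestRun (pvLineB board player r c d.1 d.2)))
  else false

-- ===== PRECONDITION & SPEC =====
-- Pre_ excludes in-range probes ((r,c) inside the 19×19 grid with board[r][c] empty) on boards
-- that are not a full 19×19 grid: there A's neighbour indexing can raise IndexError while B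
-- probes cells A's break-loops never reach; out-of-range probes and occupied cells return False
-- before any neighbour is read and are kept.
def Pre_check_win_at (board : List (List Int)) (r : Int) (c : Int) (player : Int) : Prop :=
  (¬ (0 ≤ r ∧ r < 19 ∧ 0 ≤ c ∧ c < 19))
  ∨ (board.length = 19 ∧ ∀ row ∈ board, row.length = 19)
  ∨ (pvCell board r c ≠ none ∧ pvCell board r c ≠ some 0)
instance (board : List (List Int)) (r : Int) (c : Int) (player : Int) : Decidable (Pre_check_win_at board r c player) := by unfold Pre_check_win_at; infer_instance

def pvWitness_check_win_at : List (List Int) × Int × Int × Int :=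
  (List.replicate 19 (List.replicate 19 (0 : Int)), 9, 9, 1)

def Spec_check_win_at (board : List (List Int)) (r : Int) (c : Int) (player : Int) (out : Bool) : Prop := out = check_win_at_alt board r c player
instance (board : List (List Int)) (r : Int) (c : Int) (player : Int) (out : Bool) : Decidable (Spec_check_win_at board r c player out) := by unfold Spec_check_win_at; infer_instance

-- ===== CLAIM (what is proved, stated in full; the proofs are below) =====
def Claim_equal_check_win_at : Prop := ∀ (board : List (List Int)) (r : Int) (c : Int) (player : Int), Dom_check_win_at board r c player → Pre_check_win_at board r c player → Spec_check_win_at board r c player (check_win_at board r c player)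

-- ===== LEMMAS AND PROOFS =====

-- abstract form of A's break-loop: count a prefix of trues
def pvPref : List Bool → Int → Int
  | [], k => k
  | b :: rest, k => if b then pvPref rest (k + 1) else k

-- the whole per-direction equivalence, decided over the 8 neighbour booleans
theorem pvCore (a b c d e f g h : Bool) :
    (5 ≤ pvPref [e, f, g, h] (pvPref [a, b, c, d] 1)) =
    (5 ≤ pvBestRun [h, g, f, e, true, a, b, c, d]) := by
  revert a b c d e f g h; decide

theorem pvRange15 : PySem.List.pyRange 1 5 1 = [1, 2, 3, 4] := by decide
theorem pvRangeM44 : PySem.List.pyRange (-4) 5 1 = [-4, -3, -2, -1, 0, 1, 2, 3, 4] := by decide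

-- mutating (r,c) does not change any other in-range cell of a 19×19 board
theorem pvCell_set (board : List (List Int)) (r c v nr nc : Int)
    (hb : board.length = 19)
    (hr : 0 ≤ r ∧ r < 19 ∧ 0 ≤ c ∧ c < 19)
    (hn : 0 ≤ nr ∧ nr < 19 ∧ 0 ≤ nc ∧ nc < 19)
    (hne : nr ≠ r ∨ nc ≠ c) :
    pvCell (pvSetCell board r c v) nr nc = pvCell board nr nc := by
  obtain ⟨hr0, hr1, hc0, hc1⟩ := hr
  obtain ⟨hn0, hn1, hm0, hm1⟩ := hn
  rw [pvCell, pvCell,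
    PySem.List.pyGet?_of_nonneg _ hn0, PySem.List.pyGet?_of_nonneg _ hn0]
  unfold pvSetCell
  by_cases hnr : nr.toNat = r.toNat
  · have hnc : c.toNat ≠ nc.toNat := by
      rcases hne with h | h <;> omega
    have hlt : r.toNat < board.length := by omega
    rw [hnr, List.getElem?_set_self hlt]
    have hget : board[r.toNat]? = some board[r.toNat] := List.getElem?_eq_getElem hlt
    simp only [List.getD, hget, Option.getD_some, Option.bind_some]
    rw [PySem.List.pyGet?_of_nonneg _ hm0, PySem.List.pyGet?_of_nonneg _ hm0,
      List.getElem?_set_ne hnc]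
  · rw [List.getElem?_set_ne (fun h => hnr h.symm)]

-- the same, at the level of A's match test
theorem pvHit_set (board : List (List Int)) (r c v player nr nc : Int)
    (hb : board.length = 19) (hrow : ∀ row ∈ board, row.length = 19)
    (hr : 0 ≤ r ∧ r < 19 ∧ 0 ≤ c ∧ c < 19)
    (hne : nr ≠ r ∨ nc ≠ c) :
    pvHitA (pvSetCell board r c v) player nr nc = pvHitA board player nr nc := by
  by_cases hn : 0 ≤ nr ∧ nr < 19 ∧ 0 ≤ nc ∧ nc < 19
  · unfold pvHitA
    rw [pvCell_set board r c v nr nc hb hr hn hne]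
  · unfold pvHitA
    simp [hn]

-- one direction of the main goal: A's count test equals B's best-run test
theorem pvDir (board : List (List Int)) (player r c dr dc : Int)
    (hb : board.length = 19) (hrow : ∀ row ∈ board, row.length = 19)
    (hr : 0 ≤ r ∧ r < 19 ∧ 0 ≤ c ∧ c < 19)
    (hd : ∀ i : Int, i ≠ 0 → r + i * dr ≠ r ∨ c + i * dc ≠ c) :
    (5 ≤ pvBwdA (pvSetCell board r c player) player r c dr dc (PySem.List.pyRange 1 5 1)
          (pvFwdA (pvSetCell board r c player) player r c dr dc (PySem.List.pyRange 1 5 1) 1)) =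
    (5 ≤ pvBestRun (pvLineB board player r c dr dc)) := by
  rw [pvRange15]
  have hset : ∀ i : Int, i ≠ 0 →
      pvHitA (pvSetCell board r c player) player (r + i * dr) (c + i * dc) =
      pvHitA board player (r + i * dr) (c + i * dc) :=
    fun i hi => pvHit_set board r c player player _ _ hb hrow hr (hd i hi)
  have hfwd : pvFwdA (pvSetCell board r c player) player r c dr dc [1, 2, 3, 4] 1 =
      pvPref [pvHitA board player (r + 1 * dr) (c + 1 * dc),
              pvHitA board player (r + 2 * dr) (c + 2 * dc),
              pvHitA board player (r + 3 * dr) (c + 3 * dc),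
              pvHitA board player (r + 4 * dr) (c + 4 * dc)] 1 := by
    simp only [pvFwdA, pvPref, hset 1 (by norm_num), hset 2 (by norm_num),
      hset 3 (by norm_num), hset 4 (by norm_num)]
  have hbwd : ∀ k : Int, pvBwdA (pvSetCell board r c player) player r c dr dc [1, 2, 3, 4] k =
      pvPref [pvHitA board player (r + (-1) * dr) (c + (-1) * dc),
              pvHitA board player (r + (-2) * dr) (c + (-2) * dc),
              pvHitA board player (r + (-3) * dr) (c + (-3) * dc),
              pvHitA board player (r + (-4) * dr) (c + (-4) * dc)] k := by
    intro k
    have e1 : r - 1 * dr = r + (-1) * dr := by ring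
    have e2 : r - 2 * dr = r + (-2) * dr := by ring
    have e3 : r - 3 * dr = r + (-3) * dr := by ring
    have e4 : r - 4 * dr = r + (-4) * dr := by ring
    have f1 : c - 1 * dc = c + (-1) * dc := by ring
    have f2 : c - 2 * dc = c + (-2) * dc := by ring
    have f3 : c - 3 * dc = c + (-3) * dc := by ring
    have f4 : c - 4 * dc = c + (-4) * dc := by ring
    simp only [pvBwdA, pvPref, e1, e2, e3, e4, f1, f2, f3, f4,
      hset (-1) (by norm_num), hset (-2) (by norm_num),
      hset (-3) (by norm_num), hset (-4) (by norm_num)]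
  have hline : pvLineB board player r c dr dc =
      [pvHitA board player (r + (-4) * dr) (c + (-4) * dc),
       pvHitA board player (r + (-3) * dr) (c + (-3) * dc),
       pvHitA board player (r + (-2) * dr) (c + (-2) * dc),
       pvHitA board player (r + (-1) * dr) (c + (-1) * dc),
       true,
       pvHitA board player (r + 1 * dr) (c + 1 * dc),
       pvHitA board player (r + 2 * dr) (c + 2 * dc),
       pvHitA board player (r + 3 * dr) (c + 3 * dc),
       pvHitA board player (r + 4 * dr) (c + 4 * dc)] := by
    rw [pvLineB, pvRangeM44]
    simp [pvHitA]
  rw [hfwd, hbwd, hline, pvCore]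

-- ===== VERDICT (by name: the statement is the Claim_ definition above) =====
theorem check_win_at_spec : Claim_equal_check_win_at := by
  intro board r c player _hdom hpre
  unfold Spec_check_win_at check_win_at check_win_at_alt
  by_cases hg : (decide (0 ≤ r ∧ r < 19 ∧ 0 ≤ c ∧ c < 19) && (pvCell board r c == some (0 : Int))) = true
  · rw [if_pos hg, if_pos hg]
    have hr : 0 ≤ r ∧ r < 19 ∧ 0 ≤ c ∧ c < 19 := by
      have := hg; simp only [Bool.and_eq_true, decide_eq_true_eq] at this; exact this.1
    have hcell : pvCell board r c = some 0 := by
      have := hg; simp only [Bool.and_eq_true, beq_iff_eq] at this; exact this.2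
    have hsz : board.length = 19 ∧ ∀ row ∈ board, row.length = 19 := by
      rcases hpre with h | h | h
      · exact absurd hr h
      · exact h
      · exact absurd hcell h.2
    have d1 := pvDir board player r c 1 0 hsz.1 hsz.2 hr (by intro i hi; left; omega)
    have d2 := pvDir board player r c 0 1 hsz.1 hsz.2 hr (by intro i hi; right; omega)
    have d3 := pvDir board player r c 1 1 hsz.1 hsz.2 hr (by intro i hi; left; omega)
    have d4 := pvDir board player r c 1 (-1) hsz.1 hsz.2 hr (by intro i hi; left; omega)
    simp only [pvDirsA, List.any_cons, List.any_nil]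
    simp only [d1, d2, d3, d4]
    by_cases b1 : 5 ≤ pvBestRun (pvLineB board player r c 1 0) <;>
      by_cases b2 : 5 ≤ pvBestRun (pvLineB board player r c 0 1) <;>
        by_cases b3 : 5 ≤ pvBestRun (pvLineB board player r c 1 1) <;>
          by_cases b4 : 5 ≤ pvBestRun (pvLineB board player r c 1 (-1)) <;>
            simp [b1, b2, b3, b4]
  · rw [if_neg hg, if_neg hg]
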